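-- pv_equiv track=rewrite | github.com/BGI-Qingdao/ACCESS | final_code/training/train.py | filter_ec_numbers
-- ===== SOURCE A (Python) =====
-- def filter_ec_numbers(ec_list):
--     """
--     Filter EC numbers by removing parent nodes if their deeper child nodes exist in the list.
--
--     Args:
--         ec_list (list): List of EC numbers to filter.
--
--     Returns:
--         list: Filtered list of EC numbers with redundant parent nodes removed.
--     """
--     zero_ec = '0.-.-.-'
--     if zero_ec in ec_list:
--         # Find the index of the first occurrence of '0.-.-.-'
--         zero_index = ec_list.index(zero_ec)
--
--         # If '0.-.-.-' is the first element, remove all subsequent elements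
--         if zero_index == 0:
--             ec_list = [zero_ec]
--         else:
--             # If '0.-.-.-' is not first, remove all elements after the first occurrence
--             ec_list = ec_list[:zero_index]
--
--     # Convert the EC list to a set for efficient lookups and deletions
--     ec_set = set(ec_list)
--
--     # Sort EC numbers by effective depth (deepest first)
--     sorted_ec_list = sorted(ec_set, key=lambda x: len([p for p in x.split('.') if p != '-']), reverse=True)
--
--     # Track EC numbers to remove (parent nodes)
--     to_remove = set()
--
--     # Process each EC number starting from the deepest effective layer
--     for ec in sorted_ec_list:
--         parts = ec.split('.')
--         for i in range(len([p for p in parts if p != '-']) - 1, 0, -1):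
--             # construct the parent node
--             parent = '.'.join(parts[:i] + ['-'] * (4 - i))
--             if parent in ec_set:
--                 to_remove.add(parent)  # Mark parent for removal
--     # Remove all marked parent nodes from the original set
--     filtered_ec_set = ec_set - to_remove
--     # Return the filtered list in the original order
--     filtered_ec_list = [ec for ec in ec_list if ec in filtered_ec_set]
--
--     return filtered_ec_list
-- ===== SOURCE B (Python) =====
-- def filter_ec_numbers(ec_list):
--     """Same filtering, decided per candidate: an entry is kept unless some member of the
--     set has it as a strictly shallower dash-padded ancestor, tested by direct part-list
--     comparison (no sort, no removal set, no set difference, no string joining)."""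
--     zero_ec = '0.-.-.-'
--     if zero_ec in ec_list:
--         zero_index = ec_list.index(zero_ec)
--         ec_list = [zero_ec] if zero_index == 0 else ec_list[:zero_index]
--
--     ec_set = set(ec_list)
--     # parse each member once: (its part list, its effective depth)
--     parsed = []
--     for q in ec_set:
--         qparts = q.split('.')
--         parsed.append((qparts, sum(1 for x in qparts if x != '-')))
--
--     def redundant(p):
--         pparts = p.split('.')
--         for qparts, depth in parsed:
--             for i in range(1, depth):
--                 if pparts == qparts[:i] + ['-'] * (4 - i):
--                     return True
--         return False
--
--     return [ec for ec in ec_list if not redundant(ec)]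
-- ===== Notes on version B (the rewrite author's own statement) =====
-- stated objective: alternative
-- what changed: Inverts A's child-driven marking: instead of depth-sorting the set, joining parent strings, accumulating a to_remove set and subtracting it, B parses every member once and decides keep-ness per candidate with a nested descendant-existence scan that compares the candidate's part-list directly against each member's dash-padded ancestor part-lists, with no sort, no string joining, no removal set and no set difference.
import Mathlib
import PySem

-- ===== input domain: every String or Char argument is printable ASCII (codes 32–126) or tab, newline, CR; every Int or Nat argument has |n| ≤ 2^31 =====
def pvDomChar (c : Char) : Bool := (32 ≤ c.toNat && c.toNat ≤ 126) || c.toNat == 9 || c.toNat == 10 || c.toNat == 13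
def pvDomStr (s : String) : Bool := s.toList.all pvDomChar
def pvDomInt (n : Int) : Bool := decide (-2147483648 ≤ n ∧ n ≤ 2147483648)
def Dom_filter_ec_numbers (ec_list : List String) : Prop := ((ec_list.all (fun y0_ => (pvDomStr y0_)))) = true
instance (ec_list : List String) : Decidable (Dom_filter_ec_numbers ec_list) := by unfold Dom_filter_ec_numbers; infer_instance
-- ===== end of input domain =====

-- B keeps A's '0.-.-.-' preprocessing but inverts the algorithm: instead of A's depth-sorted
-- pass that joins parent strings, marks them in a to_remove set and subtracts it, B decides
-- keep-ness per candidate by scanning the set for a strictly deeper member whose '-'-padded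
-- ancestor part-list equals the candidate's part-list (no sort, no join, no removal set).

-- '0.-.-.-' truncation, identical first lines of both Pythons
def pvTrunc (ec_list : List String) : List String :=
  if "0.-.-.-" ∈ ec_list then
    match PySem.List.index? ec_list "0.-.-.-" with
    | some zero_index =>
        if zero_index = 0 then ["0.-.-.-"]
        else PySem.List.slice ec_list none (some (zero_index : Int))
    | none => ec_list
  else ec_list

-- ec.split('.')  (Python split with a non-empty separator never raises)
def pvParts (s : String) : List String := (PySem.Str.split? s ".").getD []

-- ===== PORT A =====
-- len([p for p in parts if p != '-'])
def pvEff (parts : List String) : Nat := (parts.filter (fun p => p ≠ "-")).length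
-- '.'.join(parts[:i] + ['-'] * (4 - i))
def pvParent (parts : List String) (i : Int) : String :=
  PySem.Str.join "." (PySem.List.slice parts none (some i) ++ PySem.List.pyRepeat ["-"] (4 - i))

def filter_ec_numbers (ec_list : List String) : List String :=
  let ec_list := pvTrunc ec_list
  let ec_set := PySem.Set.ofList ec_list
  let sorted_ec_list := PySem.List.sorted ec_set (fun x => (pvEff (pvParts x) : Int)) true
  let to_remove : PySem.Set String :=
    sorted_ec_list.foldl (fun tr ec =>
      let parts := pvParts ec
      (PySem.List.pyRange ((pvEff parts : Int) - 1) 0 (-1)).foldl (fun tr i =>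
        let parent := pvParent parts i
        if PySem.Set.contains ec_set parent then PySem.Set.add tr parent else tr) tr)
      PySem.Set.empty
  let filtered_ec_set := PySem.Set.diff ec_set to_remove
  ec_list.filter (fun ec => PySem.Set.contains filtered_ec_set ec)

-- ===== PORT B =====
-- sum(1 for x in qparts if x != '-')
def pvDepth (parts : List String) : Nat := parts.countP (fun x => x ≠ "-")

def filter_ec_numbers_alt (ec_list : List String) : List String :=
  let ec_list := pvTrunc ec_list
  let ec_set := PySem.Set.ofList ec_list
  -- parse each member once; `parsed` and the early 'return True' below are consumed only
  -- through an existence test, so the set's hash iteration order cannot influence the result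
  let parsed : List (List String × Nat) :=
    ec_set.foldl (fun acc q => acc ++ [(pvParts q, pvDepth (pvParts q))]) []
  let redundant : String → Bool := fun p =>
    let pparts := pvParts p
    parsed.any (fun qd =>
      (PySem.List.pyRange 1 (qd.2 : Int)).any (fun i =>
        pparts == PySem.List.slice qd.1 none (some i) ++ PySem.List.pyRepeat ["-"] (4 - i)))
  ec_list.filter (fun ec => ! redundant ec)

-- ===== PRECONDITION & SPEC =====
def Spec_filter_ec_numbers (ec_list : List String) (out : List String) : Prop := out = filter_ec_numbers_alt ec_list
instance (ec_list : List String) (out : List String) : Decidable (Spec_filter_ec_numbers ec_list out) := by unfold Spec_filter_ec_numbers; infer_instance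

-- ===== CLAIM (what is proved, stated in full; the proofs are below) =====
def Claim_equal_filter_ec_numbers : Prop := ∀ (ec_list : List String), Dom_filter_ec_numbers ec_list → Spec_filter_ec_numbers ec_list (filter_ec_numbers ec_list)

-- ===== LEMMAS AND PROOFS =====

-- membership in the inner conditional-add fold of A
lemma mem_inner_fold (is : List Int) (p : Int → Bool) (f : Int → String)
    (tr : PySem.Set String) (x : String) :
    x ∈ is.foldl (fun tr i => if p i then PySem.Set.add tr (f i) else tr) tr ↔
      x ∈ tr ∨ ∃ i ∈ is, p i ∧ x = f i := by
  induction is generalizing tr with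
  | nil => simp
  | cons j js ih =>
      simp only [List.foldl_cons, ih]
      by_cases hj : p j = true
      · simp only [hj, if_pos, PySem.Set.mem_add, List.mem_cons]
        constructor
        · rintro (⟨h | h⟩ | ⟨i, hi, h⟩)
          · exact Or.inl h
          · exact Or.inr ⟨j, Or.inl rfl, hj, h⟩
          · exact Or.inr ⟨i, Or.inr hi, h⟩
        · rintro (h | ⟨i, (rfl | hi), hp, h⟩)
          · exact Or.inl (Or.inl h)
          · exact Or.inl (Or.inr h)
          · exact Or.inr ⟨i, hi, hp, h⟩
      · simp only [hj, if_neg, Bool.false_eq_true, not_false_iff, List.mem_cons]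
        constructor
        · rintro (h | ⟨i, hi, h⟩)
          · exact Or.inl h
          · exact Or.inr ⟨i, Or.inr hi, h⟩
        · rintro (h | ⟨i, (rfl | hi), hp, h⟩)
          · exact Or.inl h
          · exact absurd hp (by simp [hj])
          · exact Or.inr ⟨i, hi, hp, h⟩

-- membership in A's to_remove fold
lemma mem_outer_fold (l : List String) (g : String → List Int)
    (p : String → Int → Bool) (f : String → Int → String)
    (tr : PySem.Set String) (x : String) :
    x ∈ l.foldl (fun tr ec =>
        (g ec).foldl (fun tr i => if p ec i then PySem.Set.add tr (f ec i) else tr) tr) tr ↔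
      x ∈ tr ∨ ∃ ec ∈ l, ∃ i ∈ g ec, p ec i ∧ x = f ec i := by
  induction l generalizing tr with
  | nil => simp
  | cons q qs ih =>
      simp only [List.foldl_cons, ih, mem_inner_fold, List.mem_cons]
      constructor
      · rintro ((h | h) | ⟨ec, hec, h⟩)
        · exact Or.inl h
        · exact Or.inr ⟨q, Or.inl rfl, h⟩
        · exact Or.inr ⟨ec, Or.inr hec, h⟩
      · rintro (h | ⟨ec, (rfl | hec), h⟩)
        · exact Or.inl (Or.inl h)
        · exact Or.inl (Or.inr h)
        · exact Or.inr ⟨ec, hec, h⟩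

-- PySem's fueled splitOn with a one-character separator is Mathlib's List.splitOn
lemma go_splitOn (c : Char) (fuel : Nat) (l cur : List Char) (acc : List (List Char))
    (h : l.length < fuel) :
    PySem.Chars.splitOn.go [c] fuel l cur acc =
      acc.reverse ++ (match List.splitOnP (fun x => x == c) l with
        | [] => []
        | hd :: t => (cur.reverse ++ hd) :: t) := by
  induction fuel generalizing l cur acc with
  | zero => omega
  | succ n ih =>
      cases l with
      | nil => simp [PySem.Chars.splitOn.go, List.splitOnP_nil]
      | cons a rest =>
          have hlen : rest.length < n := by simp at h; omega
          rw [PySem.Chars.splitOn.go]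
          simp only [List.isPrefixOf, Bool.and_true, List.splitOnP_cons, List.length_singleton,
            List.drop_succ_cons, List.drop_zero]
          by_cases hc : c = a
          · subst hc
            simp only [beq_self_eq_true, if_pos]
            rw [ih rest [] (cur.reverse :: acc) hlen]
            cases hsp : List.splitOnP (fun x => x == c) rest with
            | nil => exact absurd hsp (List.splitOnP_ne_nil _ _)
            | cons hd t => simp
          · have h1 : (c == a) = false := beq_eq_false_iff_ne.mpr hc
            have h2 : (a == c) = false := beq_eq_false_iff_ne.mpr (Ne.symm hc)
            simp only [h1, h2, Bool.false_eq_true, if_neg, not_false_iff]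
            rw [ih rest (a :: cur) acc hlen]
            cases hsp : List.splitOnP (fun x => x == c) rest with
            | nil => exact absurd hsp (List.splitOnP_ne_nil _ _)
            | cons hd t => simp [List.modifyHead]

lemma chars_splitOn_single (c : Char) (s : List Char) :
    PySem.Chars.splitOn s [c] = List.splitOn c s := by
  rw [PySem.Chars.splitOn, go_splitOn c (s.length + 1) s [] [] (by omega)]
  unfold List.splitOn
  cases hsp : List.splitOnP (fun x => x == c) s with
  | nil => exact absurd hsp (List.splitOnP_ne_nil _ _)
  | cons hd t => simp

lemma pvParts_eq (s : String) :
    pvParts s = (List.splitOn '.' s.toList).map String.ofList := by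
  have h : ".".toList = ['.'] := rfl
  simp [pvParts, PySem.Str.split?, PySem.Chars.split?, h, chars_splitOn_single]

-- every piece of a splitOn is free of the separator
lemma not_mem_of_mem_splitOnP (c : Char) (s : List Char) :
    ∀ t ∈ List.splitOnP (fun x => x == c) s, c ∉ t := by
  induction s with
  | nil => simp [List.splitOnP_nil]
  | cons a rest ih =>
      rw [List.splitOnP_cons]
      by_cases hc : (a == c) = true
      · simp only [hc, if_pos]
        rintro t ht
        rcases List.mem_cons.1 ht with rfl | ht
        · simp
        · exact ih t ht
      · simp only [hc, Bool.false_eq_true, if_neg, not_false_iff]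
        cases hsp : List.splitOnP (fun x => x == c) rest with
        | nil => exact absurd hsp (List.splitOnP_ne_nil _ _)
        | cons hd tl =>
            simp only [List.modifyHead]
            rintro t ht
            rcases List.mem_cons.1 ht with rfl | ht
            · intro hm
              rcases List.mem_cons.1 hm with rfl | hm
              · simp at hc
              · exact ih hd (hsp ▸ List.mem_cons_self) hm
            · exact ih t (hsp ▸ List.mem_cons_of_mem _ ht)

lemma pvParts_dotfree (s : String) : ∀ t ∈ pvParts s, '.' ∉ t.toList := by
  rw [pvParts_eq]
  rintro t ht
  rcases List.mem_map.1 ht with ⟨cs, hcs, rfl⟩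
  rw [String.toList_ofList]
  exact not_mem_of_mem_splitOnP '.' s.toList cs hcs

lemma pvParts_ne_nil (s : String) : pvParts s ≠ [] := by
  rw [pvParts_eq]
  intro h
  rcases List.map_eq_nil_iff.1 h with h
  exact List.splitOnP_ne_nil _ _ h

-- '.'.join(s.split('.')) == s
lemma join_pvParts (s : String) : PySem.Str.join "." (pvParts s) = s := by
  rw [pvParts_eq, PySem.Str.join, PySem.Chars.join]
  have h : ".".toList = ['.'] := rfl
  rw [h, List.map_map]
  have h2 : (String.toList ∘ String.ofList) = id := by
    funext l; simp [String.toList_ofList]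
  rw [h2, List.map_id]
  rw [List.intercalate_splitOn, String.ofList_toList]

-- ('.'.join(L)).split('.') == L for non-empty L of dot-free pieces
lemma pvParts_join (L : List String) (hne : L ≠ []) (hdf : ∀ l ∈ L, '.' ∉ l.toList) :
    pvParts (PySem.Str.join "." L) = L := by
  rw [pvParts_eq, PySem.Str.join]
  have h : ".".toList = ['.'] := rfl
  rw [String.toList_ofList, PySem.Chars.join, h]
  rw [List.splitOn_intercalate]
  · rw [List.map_map]
    have h2 : (String.ofList ∘ String.toList) = id := by
      funext t; simp [String.ofList_toList]
    rw [h2, List.map_id]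
  · rintro l hl
    rcases List.mem_map.1 hl with ⟨t, ht, rfl⟩
    exact hdf t ht
  · simpa using hne

-- the descendant pattern of B names exactly the parent string of A
lemma parent_eq_iff (ec q : String) (i : Int) (h1 : 1 ≤ i) :
    ec = pvParent (pvParts q) i ↔
      pvParts ec = PySem.List.slice (pvParts q) none (some i) ++ PySem.List.pyRepeat ["-"] (4 - i) := by
  set L := PySem.List.slice (pvParts q) none (some i) ++ PySem.List.pyRepeat ["-"] (4 - i) with hL
  have hslice : PySem.List.slice (pvParts q) none (some i) = (pvParts q).take i.toNat :=
    PySem.List.slice_to _ (by omega)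
  have hne : L ≠ [] := by
    rw [hL, hslice]
    cases hq : pvParts q with
    | nil => exact absurd hq (pvParts_ne_nil q)
    | cons a t =>
        have : 1 ≤ i.toNat := by omega
        cases hi : i.toNat with
        | zero => omega
        | succ n => simp [List.take]
  have hdf : ∀ l ∈ L, '.' ∉ l.toList := by
    rw [hL, hslice]
    rintro l hl
    rcases List.mem_append.1 hl with hl | hl
    · exact pvParts_dotfree q l (List.take_subset _ _ hl)
    · have : l = "-" := by
        simp only [PySem.List.pyRepeat, List.mem_flatten] at hl
        rcases hl with ⟨bag, hbag, hlb⟩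
        rcases List.eq_of_mem_replicate hbag with rfl
        simpa using hlb
      subst this; decide
  constructor
  · rintro rfl
    rw [pvParent, ← hL]
    exact pvParts_join L hne hdf
  · intro h
    rw [pvParent, ← hL, ← h, join_pvParts]

-- sum(1 for …) and len([…]) count the same parts
lemma pvDepth_eq (parts : List String) : pvDepth parts = pvEff parts := by
  simp [pvDepth, pvEff, List.countP_eq_length_filter]

-- ===== VERDICT (by name: the statement is the Claim_ definition above) =====
theorem filter_ec_numbers_spec : Claim_equal_filter_ec_numbers := by
  intro ec_list _
  unfold Spec_filter_ec_numbers filter_ec_numbers filter_ec_numbers_alt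
  apply List.filter_congr
  intro ec hec
  have hecS : ec ∈ PySem.Set.ofList (pvTrunc ec_list) :=
    (PySem.Set.mem_ofList _ _).2 hec
  rw [Bool.eq_iff_iff, PySem.Set.contains_iff, PySem.Set.mem_diff, mem_outer_fold,
      Bool.not_eq_true', Bool.eq_false_iff]
  simp only [Ne, List.any_eq_true, beq_iff_eq]
  have hparsed : ∀ qd : List String × Nat,
      qd ∈ (PySem.Set.ofList (pvTrunc ec_list)).foldl
          (fun acc q => acc ++ [(pvParts q, pvDepth (pvParts q))]) [] ↔
        ∃ q ∈ PySem.Set.ofList (pvTrunc ec_list), qd = (pvParts q, pvDepth (pvParts q)) := by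
    intro qd
    rw [PySem.List.foldl_append_singleton_eq_map]
    simp [eq_comm]
  constructor
  · rintro ⟨-, hnr⟩ ⟨qd, hqd, i, hi, hEq⟩
    rcases (hparsed qd).1 hqd with ⟨q, hq, rfl⟩
    rw [PySem.List.mem_pyRange_one] at hi
    have h1 : 1 ≤ i := hi.1
    have hpar : ec = pvParent (pvParts q) i := (parent_eq_iff ec q i h1).2 hEq
    apply hnr
    refine Or.inr ⟨q, (PySem.List.mem_sorted _ _ _ _).2 hq, i, ?_, ?_, hpar⟩
    · rw [PySem.List.mem_pyRange_neg_one]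
      have := hi.2
      rw [pvDepth_eq] at this
      omega
    · rw [← hpar]
      exact (PySem.Set.contains_iff _ _).mpr hecS
  · intro h
    refine ⟨hecS, ?_⟩
    rintro (h0 | ⟨q, hq, i, hi, hcond, hEq⟩)
    · exact List.not_mem_nil h0
    · rw [PySem.List.mem_pyRange_neg_one] at hi
      apply h
      refine ⟨(pvParts q, pvDepth (pvParts q)),
        (hparsed _).2 ⟨q, (PySem.List.mem_sorted _ _ _ _).1 hq, rfl⟩, i, ?_,
        (parent_eq_iff ec q i hi.1).1 hEq⟩
      rw [PySem.List.mem_pyRange_one, pvDepth_eq]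
      omega
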